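-- pv_equiv track=rewrite | github.com/jatman2002/UoB.Y4.Dissertation | src/existing.py | get_wasted_slots
-- ===== SOURCE A (Python) =====
-- def get_wasted_slots(diary):
--     min_booking_length = 6
--     total_wasted_slots = 0
--     for table in diary:
--         wasted_slots = 0
--         for slot in table:
--             if slot == None:
--                 wasted_slots += 1
--             else:
--                 total_wasted_slots += wasted_slots % min_booking_length
--                 wasted_slots = 0
--
--     return total_wasted_slots
-- ===== SOURCE B (Python) =====
-- from itertools import groupby
--
-- def get_wasted_slots(diary):
--     total = 0
--     for table in diary:
--         groups = [(key, len(list(run))) for key, run in groupby(table, key=lambda s: s == None)]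
--         for key, length in groups[:-1]:
--             if key:
--                 total += length % 6
--     return total
-- ===== Notes on version B (the rewrite author's own statement) =====
-- stated objective: alternative
-- what changed: Replaced A's stateful running-counter-with-flush inner loop by run-length grouping (itertools.groupby): split each table into maximal runs and add length % 6 for every None-run that is not the table's final group.
import Mathlib
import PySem

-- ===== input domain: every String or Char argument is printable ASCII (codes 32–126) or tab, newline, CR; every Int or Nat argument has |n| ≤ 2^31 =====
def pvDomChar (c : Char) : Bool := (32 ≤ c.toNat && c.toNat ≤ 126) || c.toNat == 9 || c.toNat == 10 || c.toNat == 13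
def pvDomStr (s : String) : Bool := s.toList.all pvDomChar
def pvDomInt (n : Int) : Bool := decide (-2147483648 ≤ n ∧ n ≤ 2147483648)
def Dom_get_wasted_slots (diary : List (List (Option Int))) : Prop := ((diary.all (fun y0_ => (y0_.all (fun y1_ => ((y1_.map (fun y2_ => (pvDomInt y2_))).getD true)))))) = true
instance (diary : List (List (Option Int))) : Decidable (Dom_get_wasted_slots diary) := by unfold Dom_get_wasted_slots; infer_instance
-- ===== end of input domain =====

-- B re-decomposes A's stateful counter loop into run-length grouping (itertools.groupby):
-- sum (length % 6) over the maximal None-runs that are not the final group of a table.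
-- Objective: alternative decomposition (same cost), not a speed change.

-- ===== PORT A =====
-- A: running counter of consecutive Nones, flushed (mod 6) whenever a non-None slot follows.
def get_wasted_slots (diary : List (List (Option Int))) : Int :=
  diary.foldl (fun total table =>
    (table.foldl (fun (st : Int × Int) slot =>
        if slot = none then (st.1, st.2 + 1)
        else (st.1 + PySem.Int.mod st.2 6, 0)) (total, 0)).1) 0

-- ===== PORT B =====
-- run-length encoding of a table by the key (slot == None); groups in order, (key, length)
def pvRuns : List (Option Int) → List (Bool × Int)
  | [] => []
  | x :: xs =>
    let k : Bool := decide (x = none)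
    match pvRuns xs with
    | (k', l) :: rest => if k = k' then (k, l + 1) :: rest else (k, 1) :: (k', l) :: rest
    | [] => [(k, 1)]

def get_wasted_slots_alt (diary : List (List (Option Int))) : Int :=
  diary.foldl (fun total table =>
    (pvRuns table).dropLast.foldl
      (fun acc kl => if kl.1 then acc + PySem.Int.mod kl.2 6 else acc) total) 0

-- ===== PRECONDITION & SPEC =====
def Spec_get_wasted_slots (diary : List (List (Option Int))) (out : Int) : Prop := out = get_wasted_slots_alt diary
instance (diary : List (List (Option Int))) (out : Int) : Decidable (Spec_get_wasted_slots diary out) := by unfold Spec_get_wasted_slots; infer_instance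

-- ===== CLAIM (what is proved, stated in full; the proofs are below) =====
def Claim_equal_get_wasted_slots : Prop := ∀ (diary : List (List (Option Int))), Dom_get_wasted_slots diary → Spec_get_wasted_slots diary (get_wasted_slots diary)

-- ===== LEMMAS AND PROOFS =====

theorem pvmod6 (x : Int) : PySem.Int.mod x 6 = x % 6 :=
  PySem.Int.mod_eq_emod_of_pos (by norm_num)

-- recursive characterisation of A's inner loop: pending-None count w, flushed mod 6 at a non-None
def pvG : List (Option Int) → Int → Int
  | [], _ => 0
  | none :: xs, w => pvG xs (w + 1)
  | some _ :: xs, w => w % 6 + pvG xs 0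

-- B's per-table value as a sum
def pvS (L : List (Bool × Int)) : Int :=
  (L.dropLast.map (fun kl => if kl.1 then kl.2 % 6 else 0)).sum

theorem pvInnerA (table : List (Option Int)) : ∀ (t w : Int),
    (table.foldl (fun (st : Int × Int) slot =>
        if slot = none then (st.1, st.2 + 1)
        else (st.1 + st.2 % 6, 0)) (t, w)).1 = t + pvG table w := by
  induction table with
  | nil => intro t w; simp [pvG]
  | cons x xs ih =>
    intro t w
    cases x with
    | none => simp [pvG, ih]
    | some a => simp [pvG, ih, add_assoc]

theorem pvInnerB (L : List (Bool × Int)) : ∀ (a : Int),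
    L.foldl (fun acc kl => if kl.1 then acc + kl.2 % 6 else acc) a
      = a + (L.map (fun kl => if kl.1 then kl.2 % 6 else 0)).sum := by
  induction L with
  | nil => intro a; simp
  | cons x xs ih =>
    intro a
    cases hx : x.1 <;> simp [List.foldl_cons, hx, ih, add_assoc]

theorem pvRuns_some_shape (a : Int) (xs : List (Option Int)) :
    ∃ l r, pvRuns (some a :: xs) = (false, l) :: r := by
  show ∃ l r, (match pvRuns xs with
    | (k', l) :: rest => if (false : Bool) = k' then (false, l + 1) :: rest else (false, 1) :: (k', l) :: rest
    | [] => [(false, 1)]) = (false, l) :: r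
  match pvRuns xs with
  | [] => exact ⟨1, [], rfl⟩
  | (k', l) :: rest =>
    cases k' with
    | false => exact ⟨l + 1, rest, rfl⟩
    | true => exact ⟨1, (true, l) :: rest, rfl⟩

theorem pvS_some (a : Int) (xs : List (Option Int)) :
    pvS (pvRuns (some a :: xs)) = pvS (pvRuns xs) := by
  show pvS (match pvRuns xs with
    | (k', l) :: rest => if (false : Bool) = k' then (false, l + 1) :: rest else (false, 1) :: (k', l) :: rest
    | [] => [(false, 1)]) = pvS (pvRuns xs)
  match pvRuns xs with
  | [] => simp [pvS]
  | (k', l) :: rest =>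
    cases k' with
    | false =>
      show pvS ((false, l + 1) :: rest) = pvS ((false, l) :: rest)
      cases rest with
      | nil => simp [pvS]
      | cons y ys => simp [pvS]
    | true =>
      show pvS ((false, 1) :: (true, l) :: rest) = pvS ((true, l) :: rest)
      simp [pvS]

theorem pvRuns_replicate (n : Nat) :
    pvRuns (List.replicate n none) = if n = 0 then [] else [(true, (n : Int))] := by
  induction n with
  | zero => simp [pvRuns]
  | succ m ih =>
    rw [List.replicate_succ]
    show (match pvRuns (List.replicate m none) with
      | (k', l) :: rest => if (true : Bool) = k' then (true, l + 1) :: rest else (true, 1) :: (k', l) :: rest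
      | [] => [(true, 1)]) = _
    rw [ih]
    cases m with
    | zero => simp
    | succ k => simp

theorem pvRuns_rep_some (a : Int) (xs : List (Option Int)) :
    ∀ n : Nat, n ≠ 0 →
      pvRuns (List.replicate n none ++ some a :: xs) = (true, (n : Int)) :: pvRuns (some a :: xs) := by
  intro n
  induction n with
  | zero => intro h; exact absurd rfl h
  | succ m ih =>
    intro _
    rw [List.replicate_succ, List.cons_append]
    show (match pvRuns (List.replicate m none ++ some a :: xs) with
      | (k', l) :: rest => if (true : Bool) = k' then (true, l + 1) :: rest else (true, 1) :: (k', l) :: rest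
      | [] => [(true, 1)]) = _
    cases m with
    | zero =>
      simp only [List.replicate_zero, List.nil_append]
      obtain ⟨l, r, hr⟩ := pvRuns_some_shape a xs
      rw [hr]; simp [← hr]
    | succ k =>
      rw [ih (by omega)]
      simp

theorem pvG_eq_S (xs : List (Option Int)) : ∀ n : Nat,
    pvG xs (n : Int) = pvS (pvRuns (List.replicate n none ++ xs)) := by
  induction xs with
  | nil =>
    intro n
    simp only [List.append_nil, pvRuns_replicate, pvG]
    cases n <;> simp [pvS]
  | cons x xs ih =>
    intro n
    cases x with
    | none =>
      have h : List.replicate n (none : Option Int) ++ none :: xs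
          = List.replicate (n + 1) none ++ xs := by
        rw [List.replicate_succ']; simp
      rw [h]
      have := ih (n + 1)
      push_cast at this ⊢
      simpa [pvG] using this
    | some a =>
      have ih0 : pvG xs 0 = pvS (pvRuns xs) := by
        have := ih 0
        simpa using this
      cases n with
      | zero =>
        simp only [List.replicate_zero, List.nil_append, pvS_some, pvG]
        simpa using ih0
      | succ m =>
        rw [pvRuns_rep_some a xs _ (by omega)]
        obtain ⟨l, r, hr⟩ := pvRuns_some_shape a xs
        have hne : pvRuns (some a :: xs) ≠ [] := by rw [hr]; simp
        have hS : pvS ((true, ((m + 1 : Nat) : Int)) :: pvRuns (some a :: xs))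
            = ((m + 1 : Nat) : Int) % 6 + pvS (pvRuns (some a :: xs)) := by
          unfold pvS
          rw [List.dropLast_cons_of_ne_nil hne]
          simp
        rw [hS, pvS_some]
        simp [pvG, ih0]

theorem pv_table (table : List (Option Int)) (t : Int) :
    (table.foldl (fun (st : Int × Int) slot =>
        if slot = none then (st.1, st.2 + 1)
        else (st.1 + st.2 % 6, 0)) (t, 0)).1
      = (pvRuns table).dropLast.foldl
          (fun acc kl => if kl.1 then acc + kl.2 % 6 else acc) t := by
  rw [pvInnerA, pvInnerB]
  have := pvG_eq_S table 0
  simp only [List.replicate_zero, List.nil_append, Nat.cast_zero] at this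
  rw [this]; rfl

theorem pv_main (diary : List (List (Option Int))) :
    get_wasted_slots diary = get_wasted_slots_alt diary := by
  unfold get_wasted_slots get_wasted_slots_alt
  simp only [pvmod6]
  simp only [pv_table]

-- ===== VERDICT (by name: the statement is the Claim_ definition above) =====
theorem get_wasted_slots_spec : Claim_equal_get_wasted_slots := by
  intro diary _
  exact pv_main diary
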